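-- pv_equiv track=rewrite | github.com/pypi-data/pypi-mirror-92 | packages/python-unsiotools/python_unsiotools-1.0.0-cp37-cp37m-manylinux2010_x86_64.whl/unsiotools/simulations/ccod.py | __checkSelectCompN
-- ===== SOURCE A (Python) =====
-- def __checkSelectCompN(ss,max=10):
--     """
--     check string 'ss' given as parameter is indexed like halo_X (X
--     """
--     xx=ss.find("_")
--     if (xx!=-1):
--         comp=ss[0:xx]
--         #print "comp=",comp
--         for i in range(max):
--             if (ss==comp+"_%d"%(i)):
--                 return True,comp,i-1
--     return False,None,None
-- ===== SOURCE B (Python) =====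
-- def __checkSelectCompN(ss, max=10):
--     comp, sep, suffix = ss.partition("_")
--     if not sep or not suffix or not all('0' <= c <= '9' for c in suffix):
--         return False, None, None
--     n = 0
--     for c in suffix:
--         n = 10 * n + (ord(c) - 48)
--     if n < max and str(n) == suffix:
--         return True, comp, n - 1
--     return False, None, None
-- ===== Notes on version B (the rewrite author's own statement) =====
-- stated objective: alternative
-- what changed: A builds every candidate string comp plus separator plus index for all max indices and compares each against ss; B splits ss at the first separator once, validates the suffix as a canonical decimal numeral in one pass over it and compares its value with max.
import Mathlib
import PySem

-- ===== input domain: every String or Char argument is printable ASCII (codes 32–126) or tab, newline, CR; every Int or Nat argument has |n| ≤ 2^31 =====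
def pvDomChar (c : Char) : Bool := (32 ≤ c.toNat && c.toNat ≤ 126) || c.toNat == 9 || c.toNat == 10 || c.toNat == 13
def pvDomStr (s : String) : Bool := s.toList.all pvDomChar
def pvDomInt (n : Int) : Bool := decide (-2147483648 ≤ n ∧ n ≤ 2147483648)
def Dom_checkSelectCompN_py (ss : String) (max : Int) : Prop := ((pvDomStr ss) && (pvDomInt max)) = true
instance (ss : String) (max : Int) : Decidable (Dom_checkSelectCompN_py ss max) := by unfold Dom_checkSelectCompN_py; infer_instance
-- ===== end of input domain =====

-- B replaces A's loop over all max candidate strings by a single split of ss at the first separator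
-- and a one-pass parse of the suffix as a canonical decimal numeral (alternative algorithm).

-- ===== PORT A =====
-- A's for-loop with early return: structural recursion over the range list, same comparisons in order.
-- String work is done on .toList (PySem string functions are defined on List Char); 'comp+"_%d"%(i)' is
-- comp.toList ++ '_' :: PySem.Int.toChars i — exact for str concatenation and "%d" formatting.
def pyA_loop (cs comp : List Char) (compS : String) : List Int → Bool × Option String × Option Int
  | [] => (false, none, none)
  | i :: rest =>
    if cs = comp ++ '_' :: PySem.Int.toChars i then (true, some compS, some (i - 1))
    else pyA_loop cs comp compS rest

def checkSelectCompN_py (ss : String) (max : Int) : Bool × Option String × Option Int :=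
  let xx := PySem.Str.find ss "_"
  if xx ≠ -1 then
    let comp := PySem.Str.slice ss (some 0) (some xx)
    pyA_loop ss.toList comp.toList comp (PySem.List.pyRange 0 max 1)
  else (false, none, none)

-- ===== PORT B =====
-- Source B's ss.partition("_") for the 1-char separator, hand-ported step for step (exact: first occurrence
-- splits; none = separator absent, i.e. Python's ('ss','','')).
def altSplit : List Char → Option (List Char × List Char)
  | [] => none
  | c :: rest =>
    if c = '_' then some ([], rest)
    else (altSplit rest).map (fun p => (c :: p.1, p.2))

-- Source B's digit-accumulation loop 'n = 10*n + (ord(c) - 48)'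
def altVal (cs : List Char) : Int := cs.foldl (fun a c => 10 * a + ((c.toNat : Int) - 48)) 0

def checkSelectCompN_py_alt (ss : String) (max : Int) : Bool × Option String × Option Int :=
  match altSplit ss.toList with
  | none => (false, none, none)
  | some (comp, suffix) =>
    if suffix ≠ [] ∧ suffix.all (fun c => decide ('0' ≤ c) && decide (c ≤ '9')) then
      let n := altVal suffix
      if n < max ∧ PySem.Int.toChars n = suffix then (true, some (String.ofList comp), some (n - 1))
      else (false, none, none)
    else (false, none, none)

-- ===== PRECONDITION & SPEC =====
def Spec_checkSelectCompN_py (ss : String) (max : Int) (out : Bool × Option String × Option Int) : Prop := out = checkSelectCompN_py_alt ss max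
instance (ss : String) (max : Int) (out : Bool × Option String × Option Int) : Decidable (Spec_checkSelectCompN_py ss max out) := by unfold Spec_checkSelectCompN_py; infer_instance

-- ===== CLAIM (what is proved, stated in full; the proofs are below) =====
def Claim_equal_checkSelectCompN_py : Prop := ∀ (ss : String) (max : Int), Dom_checkSelectCompN_py ss max → Spec_checkSelectCompN_py ss max (checkSelectCompN_py ss max)

-- ===== LEMMAS AND PROOFS =====

-- characters of a decimal numeral
theorem toNat_digitChar {d : Nat} (h : d < 10) : (Nat.digitChar d).toNat = d + 48 := by
  interval_cases d <;> rfl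

theorem altVal_append (xs : List Char) (c : Char) :
    altVal (xs ++ [c]) = 10 * altVal xs + ((c.toNat : Int) - 48) := by
  simp [altVal, List.foldl_append]

-- B's digit fold inverts Nat.toDigits (= Python's str for nonnegative ints)
theorem altVal_toDigits (m : Nat) : altVal (Nat.toDigits 10 m) = (m : Int) := by
  induction m using Nat.strong_induction_on with
  | _ m ih =>
    rcases Nat.lt_or_ge m 10 with h | h
    · rw [Nat.toDigits_of_lt_base h]
      simp [altVal, toNat_digitChar h]
    · rw [Nat.toDigits_of_base_le (by norm_num) h, altVal_append,
        ih (m / 10) (Nat.div_lt_self (by omega) (by norm_num)),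
        toNat_digitChar (Nat.mod_lt _ (by norm_num))]
      have := Nat.div_add_mod m 10
      push_cast
      omega

theorem mem_toDigits_bounds {m : Nat} {c : Char} (hc : c ∈ Nat.toDigits 10 m) :
    '0' ≤ c ∧ c ≤ '9' := by
  have hd := Nat.isDigit_of_mem_toDigits (by norm_num) (by norm_num) hc
  simp only [Char.isDigit, Bool.and_eq_true, decide_eq_true_eq] at hd
  exact ⟨Char.le_def.mpr hd.1, Char.le_def.mpr hd.2⟩

theorem altVal_nonneg_aux (cs : List Char) (h : ∀ c ∈ cs, '0' ≤ c) :
    ∀ a : Int, 0 ≤ a → 0 ≤ cs.foldl (fun a c => 10 * a + ((c.toNat : Int) - 48)) a := by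
  induction cs with
  | nil => intro a ha; simpa using ha
  | cons c t ih =>
    intro a ha
    have hc : 48 ≤ (c.toNat : Int) := by
      have := h c (by simp)
      have h48 : ('0'.val ≤ c.val) := Char.le_def.mp this
      have : 48 ≤ c.toNat := h48
      omega
    rw [List.foldl_cons]
    exact ih (fun x hx => h x (by simp [hx])) _ (by omega)

theorem altVal_nonneg {cs : List Char} (h : ∀ c ∈ cs, '0' ≤ c) : 0 ≤ altVal cs :=
  altVal_nonneg_aux cs h 0 le_rfl

theorem toChars_of_nonneg {n : Int} (h : 0 ≤ n) :
    PySem.Int.toChars n = Nat.toDigits 10 n.toNat := by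
  simp [PySem.Int.toChars, not_lt.mpr h]

-- what 'suffix = str(i)' forces, for 0 ≤ i
theorem match_char {s : List Char} {i : Int} (hi : 0 ≤ i) (hs : s = PySem.Int.toChars i) :
    s ≠ [] ∧ (∀ c ∈ s, '0' ≤ c ∧ c ≤ '9') ∧ altVal s = i := by
  rw [hs, toChars_of_nonneg hi]
  refine ⟨?_, fun c hc => mem_toDigits_bounds hc, ?_⟩
  · intro hnil
    have := @Nat.length_toDigits_pos 10 i.toNat
    simp [hnil] at this
  · rw [altVal_toDigits, Int.toNat_of_nonneg hi]

-- altSplit (the port of ss.partition("_")) characterized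
theorem altSplit_none_iff (cs : List Char) : altSplit cs = none ↔ '_' ∉ cs := by
  induction cs with
  | nil => simp [altSplit]
  | cons c t ih =>
    by_cases hc : c = '_'
    · subst hc; simp [altSplit]
    · simp [altSplit, hc, ih, Option.map_eq_none_iff, Ne.symm hc]

theorem altSplit_some {cs p s : List Char} (h : altSplit cs = some (p, s)) :
    cs = p ++ '_' :: s ∧ '_' ∉ p := by
  induction cs generalizing p s with
  | nil => simp [altSplit] at h
  | cons c t ih =>
    by_cases hc : c = '_'
    · subst hc
      have h0 : altSplit ('_' :: t) = some ([], t) := by simp [altSplit]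
      rw [h0] at h
      obtain ⟨h1, h2⟩ := Prod.mk.injEq .. |>.mp (Option.some.inj h)
      subst h1; subst h2
      simp
    · simp only [altSplit, if_neg hc, Option.map_eq_some_iff] at h
      obtain ⟨⟨p', s'⟩, hsp, hpe⟩ := h
      obtain ⟨ht, hmem⟩ := ih hsp
      obtain ⟨h1, h2⟩ := Prod.mk.injEq .. |>.mp hpe
      subst h1; subst h2
      refine ⟨by simp [ht], ?_⟩
      intro hx
      rcases List.mem_cons.mp hx with hx | hx
      · exact hc hx.symm
      · exact hmem hx

-- PySem.Chars.find with the one-character needle "_"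
theorem findgo_not_mem {cs : List Char} (h : '_' ∉ cs) (k : Nat) :
    PySem.Chars.find.go ['_'] cs k = -1 := by
  induction cs generalizing k with
  | nil => simp [PySem.Chars.find.go]
  | cons c t ih =>
    simp only [List.mem_cons, not_or] at h
    have hpre : List.isPrefixOf ['_'] (c :: t) = false := by
      simp [List.isPrefixOf]
      exact h.1
    simp [PySem.Chars.find.go, hpre, ih h.2]

theorem findgo_split {p : List Char} (hp : '_' ∉ p) (s : List Char) (k : Nat) :
    PySem.Chars.find.go ['_'] (p ++ '_' :: s) k = (k : Int) + p.length := by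
  induction p generalizing k with
  | nil =>
    have hpre : List.isPrefixOf ['_'] ('_' :: s) = true := by simp [List.isPrefixOf]
    simp [PySem.Chars.find.go, hpre]
  | cons c t ih =>
    simp only [List.mem_cons, not_or] at hp
    have hpre : List.isPrefixOf ['_'] (c :: (t ++ '_' :: s)) = false := by
      simp [List.isPrefixOf]
      exact hp.1
    simp only [List.cons_append]
    rw [show PySem.Chars.find.go ['_'] (c :: (t ++ '_' :: s)) k
        = PySem.Chars.find.go ['_'] (t ++ '_' :: s) (k + 1) by
      simp [PySem.Chars.find.go, hpre]]
    rw [ih hp.2]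
    push_cast [List.length_cons]
    ring

-- A's loop returns (false, none, none) when no candidate matches
theorem pyA_loop_none {cs comp : List Char} {compS : String} {is : List Int}
    (h : ∀ i ∈ is, cs ≠ comp ++ '_' :: PySem.Int.toChars i) :
    pyA_loop cs comp compS is = (false, none, none) := by
  induction is with
  | nil => rfl
  | cons i t ih =>
    simp [pyA_loop, h i (by simp), ih (fun j hj => h j (by simp [hj]))]

-- A's loop hits exactly the canonical index n
theorem pyA_loop_hit {p s : List Char} {compS : String} {n max : Int}
    (hn : 0 ≤ n) (hs : PySem.Int.toChars n = s) (hmax : n < max) :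
    ∀ (k : Nat) (a : Int), 0 ≤ a → a ≤ n → (n - a).toNat = k →
      pyA_loop (p ++ '_' :: s) p compS (PySem.List.pyRange a max 1) =
        (true, some compS, some (n - 1)) := by
  intro k
  induction k with
  | zero =>
    intro a ha han hk
    have : a = n := by omega
    subst this
    rw [PySem.List.pyRange_one_cons (by omega)]
    simp [pyA_loop, hs]
  | succ k ih =>
    intro a ha han hk
    have halt : a < n := by omega
    rw [PySem.List.pyRange_one_cons (by omega)]
    have hne : p ++ '_' :: s ≠ p ++ '_' :: PySem.Int.toChars a := by
      intro he
      have hsa : s = PySem.Int.toChars a := (List.cons_eq_cons.mp (List.append_cancel_left he)).2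
      obtain ⟨-, -, hva⟩ := match_char ha hsa
      obtain ⟨-, -, hvn⟩ := match_char hn hs.symm
      omega
    simp only [pyA_loop]
    rw [if_neg hne]
    exact ih (a + 1) (by omega) (by omega) (by omega)

-- the two faces of the '_'-split agree
theorem find_eq_of_split {ss : String} {p s : List Char}
    (hcs : ss.toList = p ++ '_' :: s) (hp : '_' ∉ p) :
    PySem.Str.find ss "_" = (p.length : Int) := by
  rw [PySem.Str.find_eq]
  show PySem.Chars.find ss.toList ['_'] = (p.length : Int)
  rw [PySem.Chars.find, hcs, findgo_split hp]
  simp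

theorem comp_toList {ss : String} {p s : List Char}
    (hcs : ss.toList = p ++ '_' :: s) :
    (PySem.Str.slice ss (some 0) (some (p.length : Int))).toList = p := by
  have h1 : (PySem.Str.slice ss (some 0) (some (p.length : Int))).toList
      = PySem.List.slice ss.toList (some 0) (some (p.length : Int)) := by
    simp [PySem.Str.slice]
  rw [h1, PySem.List.slice_zero_start, PySem.List.slice_to _ (Int.natCast_nonneg _), hcs]
  simp

-- ===== VERDICT (by name: the statement is the Claim_ definition above) =====
theorem checkSelectCompN_py_spec : Claim_equal_checkSelectCompN_py := by
  intro ss max _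
  unfold Spec_checkSelectCompN_py checkSelectCompN_py checkSelectCompN_py_alt
  cases hsp : altSplit ss.toList with
  | none =>
    have hmem := (altSplit_none_iff _).mp hsp
    have hfind : PySem.Str.find ss "_" = -1 := by
      rw [PySem.Str.find_eq]
      exact findgo_not_mem hmem 0
    rw [hfind]
    simp
  | some ps =>
    obtain ⟨p, s⟩ := ps
    obtain ⟨hcs, hp⟩ := altSplit_some hsp
    have hfind : PySem.Str.find ss "_" = (p.length : Int) := find_eq_of_split hcs hp
    have hne : ¬((p.length : Int) = -1) := by omega
    have hcomp : (PySem.Str.slice ss (some 0) (some (p.length : Int))).toList = p :=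
      comp_toList hcs
    have hcompS : PySem.Str.slice ss (some 0) (some (p.length : Int)) = String.ofList p := by
      conv_rhs => rw [← hcomp]
      rw [String.ofList_toList]
    simp only [hfind, hcompS, hcs, ne_eq, hne, not_false_iff, if_true, String.toList_ofList]
    by_cases h1 : s ≠ [] ∧ s.all (fun c => decide ('0' ≤ c) && decide (c ≤ '9')) = true
    · have hdig : ∀ c ∈ s, '0' ≤ c ∧ c ≤ '9' := by
        intro c hc
        have h1' := h1.2
        simp only [List.all_eq_true, Bool.and_eq_true, decide_eq_true_eq] at h1'
        exact h1' c hc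
      have hn0 : 0 ≤ altVal s := altVal_nonneg (fun c hc => (hdig c hc).1)
      by_cases h2 : altVal s < max ∧ PySem.Int.toChars (altVal s) = s
      · rw [if_pos h1, if_pos h2]
        exact pyA_loop_hit hn0 h2.2 h2.1 (altVal s - 0).toNat 0 le_rfl hn0 rfl
      · rw [if_pos h1, if_neg h2]
        apply pyA_loop_none
        intro i hi heq
        have hi' := PySem.List.mem_pyRange_one.mp hi
        have hsi : s = PySem.Int.toChars i :=
          (List.cons_eq_cons.mp (List.append_cancel_left heq)).2
        obtain ⟨-, -, hval⟩ := match_char hi'.1 hsi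
        exact h2 ⟨by omega, by rw [hval, ← hsi]⟩
    · rw [if_neg h1]
      apply pyA_loop_none
      intro i hi heq
      have hi' := PySem.List.mem_pyRange_one.mp hi
      have hsi : s = PySem.Int.toChars i :=
        (List.cons_eq_cons.mp (List.append_cancel_left heq)).2
      obtain ⟨hnil, hdig, -⟩ := match_char hi'.1 hsi
      exact h1 ⟨hnil, by
        simp only [List.all_eq_true, Bool.and_eq_true, decide_eq_true_eq]
        exact hdig⟩
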